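-- pv_equiv track=rewrite | github.com/chowwingho/csc108 | a2/author_functions.py | wordify_list
-- ===== SOURCE A (Python) =====
-- def clean_up(s):
--     """ (str) -> str
--
--     Return a new string based on s in which all letters have been
--     converted to lowercase and punctuation characters have been stripped
--     from both ends. Inner punctuation is left untouched.
--
--     >>> clean_up('Happy Birthday!!!')
--     'happy birthday'
--     >>> clean_up("-> It's on your left-hand side.")
--     " it's on your left-hand side"
--     """
--
--     punctuation = """!"',;:.-?)([]<>*#\n\t\r"""
--     result = s.lower().strip(punctuation)
--     return result
--
-- def flatten_list(l):
--     """ (list) -> list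
--
--     Return a flattened list from a list, l.
--
--     >>> flatten_list([])
--     []
--     >>> flatten_list(['a', 'b'])
--     ['a', 'b']
--     >>> flatten_list(['a', ['b', ['c']]])
--     ['a', 'b', ['c']]
--     """
--     return [item for sublist in l for item in sublist]
--
-- def wordify_list(l):
--     """ (list) -> list
--
--     Return a list of words from a list of strings, l.
--
--     >>> wordify_list([])
--     []
--     >>> wordify_list(['a', 'b, c\n'])
--     ['a', 'b', 'c']
--     >>> wordify_list(['apples - pears'])
--     ['apples', 'pears']
--     """
--
--     words = []
--     for i in range(len(l)):
--         words.append(l[i].split())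
--
--     words = flatten_list(words)
--     for i in range(len(words)):
--         words[i] = clean_up(words[i])
--
--     return [item for item in words if (item != "" and not item.isspace())]
-- ===== SOURCE B (Python) =====
-- def clean_up(s):
--     punctuation = """!"',;:.-?)([]<>*#\n\t\r"""
--     return s.lower().strip(punctuation)
--
-- def wordify_list(l):
--     words = []
--     for s in l:
--         for tok in s.split():
--             cleaned = clean_up(tok)
--             if cleaned != "" and not cleaned.isspace():
--                 words.append(cleaned)
--     return words
-- ===== Notes on version B (the rewrite author's own statement) =====
-- stated objective: simpler
-- what changed: Fuses A's four passes (index-loop building a list of token lists, flatten, in-place clean_up map, final filter comprehension) into one nested loop that cleans and conditionally appends each token directly, with no intermediate lists.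
import Mathlib
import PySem

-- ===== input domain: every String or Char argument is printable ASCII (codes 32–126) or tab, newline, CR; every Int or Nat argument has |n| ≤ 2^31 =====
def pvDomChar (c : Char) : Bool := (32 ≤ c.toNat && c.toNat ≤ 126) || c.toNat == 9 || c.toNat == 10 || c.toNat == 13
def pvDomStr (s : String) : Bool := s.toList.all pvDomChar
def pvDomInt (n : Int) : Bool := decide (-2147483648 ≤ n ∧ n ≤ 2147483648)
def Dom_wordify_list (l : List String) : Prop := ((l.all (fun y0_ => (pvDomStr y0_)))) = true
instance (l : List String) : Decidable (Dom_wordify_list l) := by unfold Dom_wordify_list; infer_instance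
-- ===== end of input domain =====

-- B fuses A's four passes into one nested loop with no intermediate lists (objective: simpler).

-- ===== PORT A =====
def clean_up (s : String) : String :=
  let punctuation : String := "!\"',;:.-?)([]<>*#\n\t\r"
  PySem.Str.stripChars (PySem.Str.lower s) punctuation

def flatten_list (l : List (List String)) : List String :=
  l.flatMap (fun sublist => sublist)

def wordify_list (l : List String) : List String :=
  let words := (PySem.List.pyRange 0 (l.length : Int) 1).foldl
      (fun ws i => ws ++ [PySem.Str.split₀ (PySem.List.pyGetD l i "")]) []
  let words := flatten_list words
  let words := words.map clean_up
  words.filter (fun item => item != "" && !(PySem.Str.strIsspace item))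

-- ===== PORT B =====
def wordify_list_alt (l : List String) : List String :=
  l.foldl (fun acc s =>
    (PySem.Str.split₀ s).foldl (fun acc tok =>
      let cleaned := clean_up tok
      if cleaned != "" && !(PySem.Str.strIsspace cleaned) then acc ++ [cleaned] else acc) acc) []

-- ===== PRECONDITION & SPEC =====
def Spec_wordify_list (l : List String) (out : List String) : Prop := out = wordify_list_alt l
instance (l : List String) (out : List String) : Decidable (Spec_wordify_list l out) := by unfold Spec_wordify_list; infer_instance

-- ===== CLAIM (what is proved, stated in full; the proofs are below) =====
def Claim_equal_wordify_list : Prop := ∀ (l : List String), Dom_wordify_list l → Spec_wordify_list l (wordify_list l)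

-- ===== LEMMAS AND PROOFS =====

lemma inner_fold (toks : List String) (acc : List String) :
    toks.foldl (fun acc tok =>
      let cleaned := clean_up tok
      if cleaned != "" && !(PySem.Str.strIsspace cleaned) then acc ++ [cleaned] else acc) acc
    = acc ++ (toks.map clean_up).filter (fun item => item != "" && !(PySem.Str.strIsspace item)) := by
  induction toks generalizing acc with
  | nil => simp
  | cons t ts ih =>
    simp only [List.foldl_cons, List.map_cons, List.filter_cons, ih]
    split_ifs with h <;> simp

lemma alt_fold (l : List String) (acc : List String) :
    l.foldl (fun acc s =>
      (PySem.Str.split₀ s).foldl (fun acc tok =>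
        let cleaned := clean_up tok
        if cleaned != "" && !(PySem.Str.strIsspace cleaned) then acc ++ [cleaned] else acc) acc) acc
    = acc ++ ((l.flatMap PySem.Str.split₀).map clean_up).filter
        (fun item => item != "" && !(PySem.Str.strIsspace item)) := by
  induction l generalizing acc with
  | nil => simp
  | cons s ss ih =>
    simp only [List.foldl_cons, List.flatMap_cons, List.map_append, List.filter_append]
    rw [ih, inner_fold]
    simp [List.append_assoc]


-- ===== VERDICT (by name: the statement is the Claim_ definition above) =====
theorem wordify_list_spec : Claim_equal_wordify_list := by
  intro l _
  show wordify_list l = wordify_list_alt l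
  unfold wordify_list wordify_list_alt flatten_list
  rw [PySem.List.foldl_pyRange_zero_pyGetD' l "" (fun ws s => ws ++ [PySem.Str.split₀ s]) [],
    PySem.List.foldl_append_singleton_eq_map, alt_fold]
  simp [List.flatMap_map]
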